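-- pv_equiv track=rewrite | github.com/Arvid-pku/HW | Introduction to NLP/nlpseg/file/code/utils.py | inp2xy
-- ===== SOURCE A (Python) =====
-- def inp2xy(inp):
--     wordlist = inp.split()
--     y = []
--     for word in wordlist:
--         if (len(word)) == 1:
--             y.append(3)
--         else:
--             y.extend([0]+[1]*(len(word) - 2)+[2])
--     x = ''.join(wordlist)
--     return x, y
-- ===== SOURCE B (Python) =====
-- def inp2xy(inp):
--     # Single character-level scan: no word list is ever built.  A non-space
--     # character is a word start iff the previous character is a space (or it is
--     # the first char), a word end iff the next character is a space (or it is
--     # the last char); start&end -> 3, start -> 0, end -> 2, interior -> 1.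
--     x = []
--     y = []
--     prev_space = True
--     n = len(inp)
--     for i, c in enumerate(inp):
--         if c.isspace():
--             prev_space = True
--         else:
--             is_end = i + 1 == n or inp[i + 1].isspace()
--             x.append(c)
--             y.append(3 if prev_space and is_end else
--                      0 if prev_space else
--                      2 if is_end else 1)
--             prev_space = False
--     return ''.join(x), y
-- ===== Notes on version B (the rewrite author's own statement) =====
-- stated objective: alternative
-- what changed: B never builds the word list: instead of A's split() followed by per-word label segments, B does one character-level scan of the raw string, classifying each non-space character from its neighbours (a previous-char-is-space flag plus a lookahead at the next char) into 3/0/2/1 and collecting the non-space chars for x.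
import Mathlib
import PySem

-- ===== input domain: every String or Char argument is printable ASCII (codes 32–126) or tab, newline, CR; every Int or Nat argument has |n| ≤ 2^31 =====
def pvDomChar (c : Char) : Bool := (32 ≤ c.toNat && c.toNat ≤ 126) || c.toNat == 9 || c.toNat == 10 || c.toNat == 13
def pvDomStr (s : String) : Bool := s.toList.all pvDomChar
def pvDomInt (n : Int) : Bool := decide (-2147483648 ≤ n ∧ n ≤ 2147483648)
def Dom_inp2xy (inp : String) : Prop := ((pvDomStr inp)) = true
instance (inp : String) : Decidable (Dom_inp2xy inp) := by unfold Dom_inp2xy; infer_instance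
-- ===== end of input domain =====

-- B replaces A's split-into-words + per-word label segments by a single character-level
-- scan of the raw string that classifies each non-space char from its neighbours. Alternative algorithm, same cost.

-- ===== PORT A =====
def inp2xy (inp : String) : String × List Int :=
  let wordlist := PySem.Str.split₀ inp
  let y : List Int := wordlist.foldl (fun y word =>
      if PySem.Str.len word == 1 then y ++ [(3 : Int)]
      else y ++ ([(0 : Int)] ++ PySem.List.pyRepeat [(1 : Int)] (PySem.Str.len word - 2) ++ [(2 : Int)])) []
  let x := PySem.Str.join "" wordlist
  (x, y)

-- ===== PORT B =====
-- the loop of Source B: prev is the prev_space flag; the lookahead inp[i+1] is the head of rest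
def inp2xyGo (prev : Bool) (s : List Char) : List Char × List Int :=
  match s with
  | [] => ([], [])
  | c :: rest =>
    if PySem.Chars.isspace c then inp2xyGo true rest
    else
      let isEnd : Bool := match rest with | [] => true | d :: _ => PySem.Chars.isspace d
      let t := inp2xyGo false rest
      (c :: t.1,
       (if prev && isEnd then (3 : Int) else if prev then 0 else if isEnd then 2 else 1) :: t.2)

def inp2xy_alt (inp : String) : String × List Int :=
  let t := inp2xyGo true inp.toList
  (String.ofList t.1, t.2)

-- ===== PRECONDITION & SPEC =====
def Spec_inp2xy (inp : String) (out : String × List Int) : Prop := out = inp2xy_alt inp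
instance (inp : String) (out : String × List Int) : Decidable (Spec_inp2xy inp out) := by unfold Spec_inp2xy; infer_instance

-- ===== CLAIM (what is proved, stated in full; the proofs are below) =====
def Claim_equal_inp2xy : Prop := ∀ (inp : String), Dom_inp2xy inp → Spec_inp2xy inp (inp2xy inp)

-- ===== LEMMAS AND PROOFS =====

-- the per-word label block A builds
def pvTag (w : List Char) : List Int :=
  if w.length = 1 then [3] else 0 :: (List.replicate (w.length - 2) 1 ++ [2])

def pvNW (c : Char) : Bool := !PySem.Chars.isspace c

-- direct-recursion characterisation of str.split()
def pvWords : List Char → List (List Char)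
  | [] => []
  | c :: rest =>
    if PySem.Chars.isspace c then pvWords rest
    else (c :: rest.takeWhile pvNW) :: pvWords (rest.dropWhile pvNW)
termination_by s => s.length
decreasing_by
  · simp
  · have := List.length_dropWhile_le pvNW rest
    simp
    omega

def pvBoundary : List Char → Prop
  | [] => True
  | d :: _ => PySem.Chars.isspace d = true

theorem pvEnd_true (r : List Char) :
    pvBoundary r → (match r with | [] => true | e :: _ => PySem.Chars.isspace e) = true := by
  cases r with
  | nil => exact fun _ => rfl
  | cons e r' => exact fun hb => hb

theorem pvWords_all_nonws (w : List Char) (h : ∀ c ∈ w, PySem.Chars.isspace c = false) :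
    pvWords w = if w = [] then [] else [w] := by
  cases w with
  | nil => simp [pvWords]
  | cons c t =>
    have hc := h c (by simp)
    have ht : t.takeWhile pvNW = t := by
      rw [List.takeWhile_eq_self_iff]
      intro a ha; simp [pvNW, h a (by simp [ha])]
    have hd : t.dropWhile pvNW = [] := by
      rw [List.dropWhile_eq_nil_iff]
      intro a ha; simp [pvNW, h a (by simp [ha])]
    simp [pvWords, hc, ht, hd]

theorem pv_tw_dw (t : List Char) (c : Char) (r : List Char)
    (ht : ∀ a ∈ t, PySem.Chars.isspace a = false) (hc : PySem.Chars.isspace c = true) :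
    (t ++ c :: r).takeWhile pvNW = t ∧ (t ++ c :: r).dropWhile pvNW = c :: r := by
  induction t with
  | nil => simp [pvNW, hc]
  | cons a t ih =>
    have ha := ht a (by simp)
    have := ih (fun b hb => ht b (by simp [hb]))
    simp [pvNW, ha, this.1, this.2]

theorem pvWords_word_ws (w : List Char) (c : Char) (rest : List Char)
    (hw : w ≠ []) (hnw : ∀ a ∈ w, PySem.Chars.isspace a = false)
    (hc : PySem.Chars.isspace c = true) :
    pvWords (w ++ c :: rest) = w :: pvWords rest := by
  cases w with
  | nil => exact absurd rfl hw
  | cons d t =>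
    have hd := hnw d (by simp)
    have h := pv_tw_dw t c rest (fun a ha => hnw a (by simp [ha])) hc
    simp only [List.cons_append, pvWords, hd, Bool.false_eq_true, if_false, h.1, h.2]
    simp [hc]

theorem pv_go_spec (s : List Char) : ∀ (cur : List Char) (acc : List (List Char)),
    (∀ c ∈ cur, PySem.Chars.isspace c = false) →
    PySem.Chars.split₀.go s cur acc = acc.reverse ++ pvWords (cur.reverse ++ s) := by
  induction s with
  | nil =>
    intro cur acc hcur
    unfold PySem.Chars.split₀.go
    have := pvWords_all_nonws cur.reverse (fun c hc => hcur c (List.mem_reverse.mp hc))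
    cases cur with
    | nil => simpa using this
    | cons c t =>
      simp only [List.append_nil]
      rw [this]
      simp
  | cons c rest ih =>
    intro cur acc hcur
    unfold PySem.Chars.split₀.go
    by_cases hc : PySem.Chars.isspace c = true
    · rw [if_pos hc]
      cases cur with
      | nil =>
        rw [if_pos (by simp)]
        rw [ih [] acc (by simp)]
        simp [pvWords, hc]
      | cons d t =>
        rw [if_neg (by simp)]
        rw [ih [] ((d :: t).reverse :: acc) (by simp)]
        rw [pvWords_word_ws (d :: t).reverse c rest (by simp)
          (fun a ha => hcur a (List.mem_reverse.mp ha)) hc]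
        simp
    · rw [if_neg hc]
      rw [ih (c :: cur) acc (by intro a ha; rcases List.mem_cons.mp ha with h | h
                                · simp [h]; simpa using hc
                                · exact hcur a h)]
      simp

theorem pv_split_eq (s : List Char) : PySem.Chars.split₀ s = pvWords s := by
  unfold PySem.Chars.split₀
  simpa using pv_go_spec s [] [] (by simp)

theorem pvWords_ne_nil (s : List Char) : ∀ w ∈ pvWords s, w ≠ [] := by
  induction s using pvWords.induct with
  | case1 => simp [pvWords]
  | case2 c rest hc ih => intro w hw; exact ih w (by simpa [pvWords, hc] using hw)
  | case3 c rest hc ih =>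
    intro w hw
    rcases List.mem_cons.mp (by simpa [pvWords, hc] using hw) with h | h
    · simp [h]
    · exact ih w h

-- B's scan ignores prev at a boundary
theorem pvGo_boundary (r : List Char) (hb : pvBoundary r) (p q : Bool) :
    inp2xyGo p r = inp2xyGo q r := by
  cases r with
  | nil => rfl
  | cons d r' =>
    have hd : PySem.Chars.isspace d = true := hb
    simp [inp2xyGo, hd]

-- B's scan through the tail of a word
theorem pvGo_word (t : List Char) (r : List Char) (ht : t ≠ [])
    (hnw : ∀ a ∈ t, PySem.Chars.isspace a = false) (hb : pvBoundary r) :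
    inp2xyGo false (t ++ r) =
      (t ++ (inp2xyGo true r).1,
       List.replicate (t.length - 1) 1 ++ 2 :: (inp2xyGo true r).2) := by
  induction t with
  | nil => exact absurd rfl ht
  | cons d t ih =>
    have hd := hnw d (by simp)
    cases t with
    | nil =>
      simp only [List.nil_append, List.cons_append, inp2xyGo, hd, Bool.false_eq_true, if_false]
      rw [pvEnd_true r hb, pvGo_boundary r hb false true]
      simp
    | cons e t' =>
      have he := hnw e (by simp)
      have hrec := ih (by simp) (fun a ha => hnw a (by simp [ha]))
      rw [List.cons_append, inp2xyGo.eq_def]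
      simp only [hd, Bool.false_eq_true, if_false]
      rw [hrec]
      simp [List.replicate_succ, he]

theorem pvBoundary_drop (rest : List Char) : pvBoundary (rest.dropWhile pvNW) := by
  cases h : rest.dropWhile pvNW with
  | nil => trivial
  | cons d r' =>
    have h1 := List.head_dropWhile_not (p := pvNW) (l := rest) (by simp [h])
    simp only [h, List.head_cons] at h1
    simpa [pvNW] using h1

-- B's scan computes exactly the joined words and the concatenated tags
theorem pvGo_main : ∀ (n : Nat) (s : List Char), s.length ≤ n →
    inp2xyGo true s = ((pvWords s).flatten, (pvWords s).flatMap pvTag) := by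
  intro n
  induction n with
  | zero =>
    intro s hs
    rw [List.length_eq_zero_iff.mp (Nat.le_zero.mp hs)]
    simp [inp2xyGo, pvWords]
  | succ n ih =>
    intro s hs
    cases s with
    | nil => simp [inp2xyGo, pvWords]
    | cons c rest =>
      by_cases hc : PySem.Chars.isspace c = true
      · simp only [inp2xyGo, hc, if_true, pvWords]
        exact ih rest (by simpa using hs)
      · have hcf : PySem.Chars.isspace c = false := by simpa using hc
        have hsplit : rest = rest.takeWhile pvNW ++ rest.dropWhile pvNW :=
          (List.takeWhile_append_dropWhile).symm
        have hb := pvBoundary_drop rest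
        have hrlen : (rest.dropWhile pvNW).length ≤ n := by
          have := List.length_dropWhile_le pvNW rest
          simp at hs; omega
        have hIH := ih (rest.dropWhile pvNW) hrlen
        simp only [pvWords, hcf, Bool.false_eq_true, if_false]
        cases htw : rest.takeWhile pvNW with
        | nil =>
          have hrest : rest = rest.dropWhile pvNW := by
            conv_lhs => rw [hsplit]
            rw [htw]; simp
          simp only [inp2xyGo, hcf, Bool.false_eq_true, if_false]
          rw [pvEnd_true rest (hrest ▸ hb), pvGo_boundary rest (hrest ▸ hb) false true]
          conv_lhs => rw [hrest]
          rw [hIH]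
          simp [pvTag]
        | cons d t' =>
          have hdnw : pvNW d = true :=
            List.mem_takeWhile_imp (l := rest) (p := pvNW) (by simp [htw])
          have hdf : PySem.Chars.isspace d = false := by simpa [pvNW] using hdnw
          have hnwtw : ∀ a ∈ rest.takeWhile pvNW, PySem.Chars.isspace a = false := by
            intro a ha
            have := List.mem_takeWhile_imp ha
            simpa [pvNW] using this
          have hword := pvGo_word (rest.takeWhile pvNW) (rest.dropWhile pvNW)
            (by simp [htw]) hnwtw hb
          rw [htw] at hword
          simp only [inp2xyGo, hcf, Bool.false_eq_true, if_false]
          conv_lhs => rw [hsplit, htw]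
          rw [List.cons_append] at hword
          simp only [List.cons_append]
          simp only [hdf, Bool.true_and, Bool.false_eq_true, if_false, if_true]
          rw [hword, hIH]
          refine Prod.ext (by simp) ?_
          simp [pvTag]

-- A's fold builds exactly the concatenation of the tags
theorem pv_A_fold (ws : List (List Char)) (hne : ∀ w ∈ ws, w ≠ []) (acc : List Int) :
    ws.foldl (fun y w =>
        if ((w.length : Int) == 1) then y ++ [(3 : Int)]
        else y ++ ([(0 : Int)] ++ PySem.List.pyRepeat [(1 : Int)] ((w.length : Int) - 2) ++ [(2 : Int)]))
      acc = acc ++ ws.flatMap pvTag := by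
  induction ws generalizing acc with
  | nil => simp
  | cons w tl ih =>
    have hw : w ≠ [] := hne w (by simp)
    have hw1 : 1 ≤ w.length := List.length_pos_of_ne_nil hw
    have htl : ∀ v ∈ tl, v ≠ [] := fun v hv => hne v (by simp [hv])
    simp only [List.foldl_cons, List.flatMap_cons]
    rw [ih htl]
    by_cases h1 : w.length = 1
    · simp [h1, pvTag]
    · have hbeq : ¬ (((w.length : Int)) == 1) = true := by simp; omega
      have hrep : PySem.List.pyRepeat [(1 : Int)] ((w.length : Int) - 2)
          = List.replicate (w.length - 2) 1 := by
        rw [PySem.List.pyRepeat_singleton]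
        congr 1
        omega
      rw [if_neg hbeq, hrep]
      simp [pvTag, h1]

theorem pv_join_flatten (ws : List (List Char)) : PySem.Chars.join [] ws = ws.flatten := by
  simp [PySem.Chars.join, List.intercalate]
  induction ws with
  | nil => simp
  | cons w tl ih => cases tl <;> simp_all [List.intersperse]

-- ===== VERDICT (by name: the statement is the Claim_ definition above) =====
theorem inp2xy_spec : Claim_equal_inp2xy := by
  intro inp _
  unfold Spec_inp2xy inp2xy inp2xy_alt
  simp only [PySem.Str.split₀, pv_split_eq]
  set l := inp.toList with hl
  set ws := pvWords l with hws
  have hne : ∀ w ∈ ws, w ≠ [] := pvWords_ne_nil l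
  have hB := pvGo_main l.length l le_rfl
  have hlenA : ∀ w : List Char, PySem.Str.len (String.ofList w) = (w.length : Int) := by
    intro w; simp [PySem.Str.len]
  have hA : (ws.map String.ofList).foldl (fun y word =>
        if PySem.Str.len word == 1 then y ++ [(3 : Int)]
        else y ++ ([(0 : Int)] ++ PySem.List.pyRepeat [(1 : Int)] (PySem.Str.len word - 2) ++ [(2 : Int)])) []
      = ws.flatMap pvTag := by
    rw [List.foldl_map]
    simp only [hlenA]
    simpa using pv_A_fold ws hne []
  have hx : PySem.Str.join "" (ws.map String.ofList) = String.ofList ws.flatten := by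
    simp [PySem.Str.join, Function.comp_def, pv_join_flatten]
  rw [hA, hx, hB]
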